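-- pv_equiv track=rewrite | github.com/hsuvas/return_quest | showcase_backend.py | derive_policy_issues
-- ===== SOURCE A (Python) =====
-- from typing import Any, Dict, List, Optional, Tuple
--
-- _REASON_ISSUE_MAP: Dict[str, str] = {
--     "Defective": (
--         "Defective item return: standard 30-day window may conflict with "
--         "manufacturer defect discovery timeline"
--     ),
--     "Wrong Item": (
--         "Wrong item fulfillment: responsibility ambiguity between Amzaon "
--         "and third-party seller for mispicks"
--     ),
--     "Changed Mind": (
--         "Change-of-mind return: item must be in original, unopened condition "
--         "— condition assessment is subjective"
--     ),
--     "Damaged in Shipping": (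
--         "Carrier-damaged item: return vs. shipping insurance claim path "
--         "is ambiguous for third-party seller items"
--     ),
--     "Other": (
--         "Non-standard return reason: agent discretion required; "
--         "no clear policy guidance"
--     ),
-- }
--
-- _THIRD_PARTY_ISSUE = (
--     "Third-party seller policy: seller's return window and conditions may "
--     "differ from Amzaon's standard policy"
-- )
--
-- def derive_policy_issues(
--     items: List[Dict[str, Any]],
--     reasons: List[str],
-- ) -> List[str]:
--     """Derive a list of policy tension strings from items and return reasons."""
--     issues = []
--     has_third_party = any(
--         item.get("is_amzaon_seller", "Y") != "Y" for item in items
--     )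
--     if has_third_party:
--         issues.append(_THIRD_PARTY_ISSUE)
--
--     seen_reasons = set()
--     for reason in reasons:
--         if reason not in seen_reasons:
--             seen_reasons.add(reason)
--             issue = _REASON_ISSUE_MAP.get(reason, _REASON_ISSUE_MAP["Other"])
--             if issue not in issues:
--                 issues.append(issue)
--
--     return issues
-- ===== SOURCE B (Python) =====
-- from typing import Any, Dict, List
--
-- _REASON_ISSUE_MAP: Dict[str, str] = {
--     "Defective": (
--         "Defective item return: standard 30-day window may conflict with "
--         "manufacturer defect discovery timeline"
--     ),
--     "Wrong Item": (
--         "Wrong item fulfillment: responsibility ambiguity between Amzaon "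
--         "and third-party seller for mispicks"
--     ),
--     "Changed Mind": (
--         "Change-of-mind return: item must be in original, unopened condition "
--         "— condition assessment is subjective"
--     ),
--     "Damaged in Shipping": (
--         "Carrier-damaged item: return vs. shipping insurance claim path "
--         "is ambiguous for third-party seller items"
--     ),
--     "Other": (
--         "Non-standard return reason: agent discretion required; "
--         "no clear policy guidance"
--     ),
-- }
--
-- _THIRD_PARTY_ISSUE = (
--     "Third-party seller policy: seller's return window and conditions may "
--     "differ from Amzaon's standard policy"
-- )
--
--
-- def _distinct_issues(reasons: List[str]) -> List[str]:
--     """Recursive filter-out decomposition: take the issue of the first reason,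
--     drop every later reason that maps to the same issue, recurse on the rest.
--     No seen-set and no membership scan against the output are ever needed."""
--     if not reasons:
--         return []
--     head = _REASON_ISSUE_MAP.get(reasons[0], _REASON_ISSUE_MAP["Other"])
--     rest = [
--         r for r in reasons[1:]
--         if _REASON_ISSUE_MAP.get(r, _REASON_ISSUE_MAP["Other"]) != head
--     ]
--     return [head] + _distinct_issues(rest)
--
--
-- def derive_policy_issues(
--     items: List[Dict[str, Any]],
--     reasons: List[str],
-- ) -> List[str]:
--     has_third_party = any(
--         item.get("is_amzaon_seller", "Y") != "Y" for item in items
--     )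
--     prefix = [_THIRD_PARTY_ISSUE] if has_third_party else []
--     return prefix + _distinct_issues(reasons)
-- ===== Notes on version B (the rewrite author's own statement) =====
-- stated objective: alternative
-- what changed: Replaces A's single pass with a seen_reasons set and an append-if-absent scan of the output by a recursive filter-out decomposition: take the first reason's issue, filter every later reason mapping to that same issue out of the remainder, and recurse; no seen set and no membership test against the output exist in B.
import Mathlib
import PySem

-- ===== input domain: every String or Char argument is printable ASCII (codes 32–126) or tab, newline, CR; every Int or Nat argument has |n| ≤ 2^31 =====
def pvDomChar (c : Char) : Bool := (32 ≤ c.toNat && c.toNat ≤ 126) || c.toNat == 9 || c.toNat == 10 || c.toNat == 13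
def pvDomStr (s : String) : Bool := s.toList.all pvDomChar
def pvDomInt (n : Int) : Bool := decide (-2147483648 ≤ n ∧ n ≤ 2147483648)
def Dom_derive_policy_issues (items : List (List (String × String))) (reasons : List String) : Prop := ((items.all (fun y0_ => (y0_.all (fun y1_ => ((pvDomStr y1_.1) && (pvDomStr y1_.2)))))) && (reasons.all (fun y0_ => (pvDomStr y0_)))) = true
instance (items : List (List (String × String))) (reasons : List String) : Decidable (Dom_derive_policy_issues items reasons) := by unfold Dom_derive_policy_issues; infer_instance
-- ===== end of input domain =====

-- B replaces A's seen_reasons set + append-if-absent scan by a recursive filter-out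
-- decomposition (take the first reason's issue, drop later reasons mapping to it,
-- recurse); objective: a genuinely different decomposition, same result.

-- ===== PORT A =====
def pvReasonIssueMap : PySem.Dict String String := PySem.Dict.ofList [
  ("Defective", "Defective item return: standard 30-day window may conflict with manufacturer defect discovery timeline"),
  ("Wrong Item", "Wrong item fulfillment: responsibility ambiguity between Amzaon and third-party seller for mispicks"),
  ("Changed Mind", "Change-of-mind return: item must be in original, unopened condition — condition assessment is subjective"),
  ("Damaged in Shipping", "Carrier-damaged item: return vs. shipping insurance claim path is ambiguous for third-party seller items"),
  ("Other", "Non-standard return reason: agent discretion required; no clear policy guidance")]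

def pvThirdPartyIssue : String :=
  "Third-party seller policy: seller's return window and conditions may differ from Amzaon's standard policy"

-- _REASON_ISSUE_MAP["Other"]: the key is present in the literal map, so the
-- lookup is ported as getD with an unused placeholder default.
def pvOtherIssue : String := pvReasonIssueMap.getD "Other" ""

def derive_policy_issues (items : List (List (String × String))) (reasons : List String) : List String :=
  let has_third_party := items.any (fun item => !((PySem.Dict.mk item).getD "is_amzaon_seller" "Y" == "Y"))
  let issues : List String := if has_third_party then [pvThirdPartyIssue] else []
  let st := reasons.foldl (fun (st : List String × PySem.Set String) reason =>
      if PySem.Set.contains st.2 reason then st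
      else
        let issue := pvReasonIssueMap.getD reason pvOtherIssue
        ((if st.1.contains issue then st.1 else st.1 ++ [issue]), PySem.Set.add st.2 reason))
    (issues, PySem.Set.empty)
  st.1

-- ===== PORT B =====
-- _distinct_issues: recursion on the reasons list, filtering out of the tail every
-- reason that maps to the head's issue.
def pvDistinctIssues : List String → List String
  | [] => []
  | r :: rest =>
    let head := pvReasonIssueMap.getD r pvOtherIssue
    head :: pvDistinctIssues (rest.filter (fun s => !(pvReasonIssueMap.getD s pvOtherIssue == head)))
termination_by l => l.length
decreasing_by simp; exact le_trans (List.length_filter_le _ _) (by simp)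

def derive_policy_issues_alt (items : List (List (String × String))) (reasons : List String) : List String :=
  let has_third_party := items.any (fun item => !((PySem.Dict.mk item).getD "is_amzaon_seller" "Y" == "Y"))
  let prefixIssues : List String := if has_third_party then [pvThirdPartyIssue] else []
  prefixIssues ++ pvDistinctIssues reasons

-- ===== PRECONDITION & SPEC =====
def Spec_derive_policy_issues (items : List (List (String × String))) (reasons : List String) (out : List String) : Prop := out = derive_policy_issues_alt items reasons
instance (items : List (List (String × String))) (reasons : List String) (out : List String) : Decidable (Spec_derive_policy_issues items reasons out) := by unfold Spec_derive_policy_issues; infer_instance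

-- ===== CLAIM (what is proved, stated in full; the proofs are below) =====
def Claim_equal_derive_policy_issues : Prop := ∀ (items : List (List (String × String))) (reasons : List String), Dom_derive_policy_issues items reasons → Spec_derive_policy_issues items reasons (derive_policy_issues items reasons)

-- ===== LEMMAS AND PROOFS =====

-- A's loop body, named for the proofs.
def pvStep (st : List String × PySem.Set String) (reason : String) : List String × PySem.Set String :=
  if PySem.Set.contains st.2 reason then st
  else
    let issue := pvReasonIssueMap.getD reason pvOtherIssue
    ((if st.1.contains issue then st.1 else st.1 ++ [issue]), PySem.Set.add st.2 reason)

-- A's loop, projected to the issues component, is the add-the-mapped-issue fold: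
-- the seen_reasons test is redundant because a seen reason's issue is already in issues.
theorem pvLoop_eq_add_fold (reasons : List String) (issues : List String) (seen : PySem.Set String)
    (hinv : ∀ r ∈ seen, pvReasonIssueMap.getD r pvOtherIssue ∈ issues) :
    (reasons.foldl pvStep (issues, seen)).1
      = reasons.foldl (fun acc r => PySem.Set.add acc (pvReasonIssueMap.getD r pvOtherIssue)) issues := by
  induction reasons generalizing issues seen with
  | nil => rfl
  | cons r rs ih =>
    simp only [List.foldl_cons]
    by_cases hr : r ∈ seen
    · rw [show pvStep (issues, seen) r = (issues, seen) by simp [pvStep, hr]]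
      rw [PySem.Set.add_of_mem (hinv r hr)]
      exact ih issues seen hinv
    · rw [show pvStep (issues, seen) r
          = (PySem.Set.add issues (pvReasonIssueMap.getD r pvOtherIssue), PySem.Set.add seen r) by
        simp [pvStep, PySem.Set.add_eq_ite, hr]]
      refine ih _ _ ?_
      intro r' hr'
      rcases (PySem.Set.mem_add _ _ _).mp hr' with h | h
      · exact (PySem.Set.mem_add _ _ _).mpr (Or.inl (hinv r' h))
      · exact (PySem.Set.mem_add _ _ _).mpr (Or.inr (by rw [h]))

-- Updating a set whose head never occurs in the update list keeps the head in front.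
theorem pvUpdate_cons_notmem (l : List String) (s : List String) (x : String)
    (h : ∀ y ∈ l, y ≠ x) :
    PySem.Set.update (x :: s) l = x :: PySem.Set.update s l := by
  induction l generalizing s with
  | nil => rfl
  | cons y ys ih =>
    rw [PySem.Set.update_cons, PySem.Set.update_cons]
    have hy : y ≠ x := h y (List.mem_cons_self)
    rw [show PySem.Set.add (x :: s) y = x :: PySem.Set.add s y by
      by_cases hm : y ∈ s
      · rw [PySem.Set.add_of_mem (List.mem_cons_of_mem _ hm), PySem.Set.add_of_mem hm]
      · rw [PySem.Set.add_of_not_mem (by simp [hy, hm]), PySem.Set.add_of_not_mem hm]; rfl]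
    exact ih _ (fun z hz => h z (List.mem_cons_of_mem _ hz))

-- Updating by elements already in the set is a no-op; filtering them away changes nothing.
theorem pvUpdate_filter_mem (l : List String) (s : List String) (x : String)
    (hx : x ∈ s) :
    PySem.Set.update s l = PySem.Set.update s (l.filter (fun y => !(y == x))) := by
  induction l generalizing s with
  | nil => rfl
  | cons y ys ih =>
    by_cases hy : y = x
    · subst hy
      rw [PySem.Set.update_cons, PySem.Set.add_of_mem hx]
      simpa using ih s hx
    · have : (y :: ys).filter (fun z => !(z == x)) = y :: ys.filter (fun z => !(z == x)) := by
        simp [hy]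
      rw [this, PySem.Set.update_cons, PySem.Set.update_cons]
      exact ih _ ((PySem.Set.mem_add _ _ _).mpr (Or.inl hx))

-- The quickselect-style recursion: dedup (x :: l) = x :: dedup (l with x filtered out).
theorem pvDedup_cons_filter (x : String) (l : List String) :
    PySem.List.dedup (x :: l) = x :: PySem.List.dedup (l.filter (fun y => !(y == x))) := by
  have h0 : PySem.List.dedup (x :: l) = PySem.Set.update [x] l := by
    rw [PySem.List.dedup_eq_ofList]; rfl
  rw [h0, pvUpdate_filter_mem l [x] x (by simp),
      pvUpdate_cons_notmem _ [] x (by intro y hy; simp at hy; simpa using hy.2)]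
  rw [PySem.List.dedup_eq_ofList]; rfl

-- B's recursion computes the ordered dedup of the mapped issues.
theorem pvDistinct_eq_dedup_aux : ∀ (n : Nat) (reasons : List String), reasons.length ≤ n →
    pvDistinctIssues reasons
      = PySem.List.dedup (reasons.map (fun r => pvReasonIssueMap.getD r pvOtherIssue)) := by
  intro n
  induction n with
  | zero =>
    intro reasons h
    rw [List.eq_nil_of_length_eq_zero (Nat.le_zero.mp h), pvDistinctIssues]
    rfl
  | succ n ih =>
    intro reasons h
    cases reasons with
    | nil => rw [pvDistinctIssues]; rfl
    | cons r rest =>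
      rw [pvDistinctIssues]
      simp only [List.map_cons]
      rw [pvDedup_cons_filter]
      congr 1
      rw [ih _ (le_trans (List.length_filter_le _ _) (Nat.le_of_succ_le_succ h))]
      rw [List.filter_map]; rfl

theorem pvDistinct_eq_dedup (reasons : List String) :
    pvDistinctIssues reasons
      = PySem.List.dedup (reasons.map (fun r => pvReasonIssueMap.getD r pvOtherIssue)) :=
  pvDistinct_eq_dedup_aux reasons.length reasons le_rfl

-- No value the reason map can produce equals the third-party issue string.
theorem pvGetD_ne (r : String) :
    pvReasonIssueMap.getD r pvOtherIssue ≠ pvThirdPartyIssue := by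
  by_cases h1 : r = "Defective"; · subst h1; decide
  by_cases h2 : r = "Wrong Item"; · subst h2; decide
  by_cases h3 : r = "Changed Mind"; · subst h3; decide
  by_cases h4 : r = "Damaged in Shipping"; · subst h4; decide
  by_cases h5 : r = "Other"; · subst h5; decide
  rw [PySem.Dict.getD_of_not_contains]
  · decide
  · rw [show pvReasonIssueMap = PySem.Dict.mk [
      ("Defective", "Defective item return: standard 30-day window may conflict with manufacturer defect discovery timeline"),
      ("Wrong Item", "Wrong item fulfillment: responsibility ambiguity between Amzaon and third-party seller for mispicks"),
      ("Changed Mind", "Change-of-mind return: item must be in original, unopened condition — condition assessment is subjective"),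
      ("Damaged in Shipping", "Carrier-damaged item: return vs. shipping insurance claim path is ambiguous for third-party seller items"),
      ("Other", "Non-standard return reason: agent discretion required; no clear policy guidance")] from by decide]
    simp [Ne.symm h1, Ne.symm h2, Ne.symm h3, Ne.symm h4, Ne.symm h5]

-- A with its initial issues list equals prefix ++ dedup of the mapped reasons.
theorem pvMain (issues : List String) (reasons : List String)
    (hcase : issues = [pvThirdPartyIssue] ∨ issues = []) :
    (reasons.foldl pvStep (issues, PySem.Set.empty)).1
      = issues ++ PySem.List.dedup (reasons.map (fun r => pvReasonIssueMap.getD r pvOtherIssue)) := by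
  rw [pvLoop_eq_add_fold reasons issues PySem.Set.empty (by intro r hr; cases hr),
      ← PySem.Set.update_map_eq_foldl_add, PySem.List.dedup_eq_ofList]
  rcases hcase with h | h <;> subst h
  · rw [pvUpdate_cons_notmem]
    · rw [PySem.Set.update_nil_left]; rfl
    · intro y hy
      rcases List.mem_map.mp hy with ⟨r, _, rfl⟩
      exact pvGetD_ne r
  · rw [PySem.Set.update_nil_left]; rfl

-- ===== VERDICT (by name: the statement is the Claim_ definition above) =====
theorem derive_policy_issues_spec : Claim_equal_derive_policy_issues := by
  intro items reasons _
  unfold Spec_derive_policy_issues derive_policy_issues derive_policy_issues_alt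
  rw [pvDistinct_eq_dedup]
  by_cases h : (items.any fun item => !((PySem.Dict.mk item).getD "is_amzaon_seller" "Y" == "Y")) = true
  · simp only [h, if_true]
    exact pvMain [pvThirdPartyIssue] reasons (Or.inl rfl)
  · simp only [h, if_false, Bool.false_eq_true]
    exact pvMain [] reasons (Or.inr rfl)
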